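-- pv_equiv track=rewrite | github.com/VIDA-NYU/tim-reasoning | tim_reasoning/recipe_tagger.py | extract_action_relations
-- ===== SOURCE A (Python) =====
-- import string
--
-- punctuation_marks = string.punctuation
--
-- def extract_action_relations(tokens, tags):
--     action_relations = []
--     action = None
--     action_used = False
--
--     for token, tag in zip(tokens, tags):
--         if tag == 'ACTION':
--             if not action_used and action is not None:
--                 action_relations.append((action, None))
--             action = token
--             action_used = False
--         elif tag in {'INGREDIENT', 'UTENSIL'}:
--             object = token.rstrip(punctuation_marks)
--             if action is not None:
--                 action_relations.append((action, object))
--                 action_used = True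
--
--     if not action_used and action is not None:
--         action_relations.append((action, None))
--
--     return action_relations
-- ===== SOURCE B (Python) =====
-- import string
--
-- punctuation_marks = string.punctuation
--
-- def extract_action_relations(tokens, tags):
--     # Pass 1: group the stream into (action, [objects…]) groups.
--     groups = []
--     current = None  # the open group, or None before the first ACTION
--     for token, tag in zip(tokens, tags):
--         if tag == 'ACTION':
--             if current is not None:
--                 groups.append(current)
--             current = (token, [])
--         elif tag in ('INGREDIENT', 'UTENSIL') and current is not None:
--             current[1].append(token.rstrip(punctuation_marks))
--     if current is not None:
--         groups.append(current)
--     # Pass 2: flatten each group; a group with no objects yields (action, None).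
--     result = []
--     for action, objects in groups:
--         if objects:
--             for obj in objects:
--                 result.append((action, obj))
--         else:
--             result.append((action, None))
--     return result
-- ===== Notes on version B (the rewrite author's own statement) =====
-- stated objective: alternative
-- what changed: B replaces A's single emit-as-you-go loop with an action_used flag by a two-pass build-then-flatten: one pass groups the stream into (action, objects) groups, a second pass flattens each group, emitting (action, None) for object-less groups.
import Mathlib
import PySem

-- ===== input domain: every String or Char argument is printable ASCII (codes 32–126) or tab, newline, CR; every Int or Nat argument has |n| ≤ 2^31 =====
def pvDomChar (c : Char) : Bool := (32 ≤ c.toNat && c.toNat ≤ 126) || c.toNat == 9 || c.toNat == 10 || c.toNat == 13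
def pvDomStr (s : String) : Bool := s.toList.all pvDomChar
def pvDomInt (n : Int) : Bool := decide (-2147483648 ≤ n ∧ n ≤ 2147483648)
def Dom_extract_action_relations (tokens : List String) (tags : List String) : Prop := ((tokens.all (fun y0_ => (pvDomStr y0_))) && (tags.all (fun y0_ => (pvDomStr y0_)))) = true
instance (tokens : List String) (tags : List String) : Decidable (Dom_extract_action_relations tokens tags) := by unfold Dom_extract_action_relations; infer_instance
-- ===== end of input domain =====

-- B builds (action, objects) groups in one pass and flattens them in a second, replacing A's
-- single emit-as-you-go loop with its action_used flag; objective: alternative decomposition.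

-- shared port of the Python builtin token.rstrip(string.punctuation)
def pyRstripPunct (s : String) : String :=
  String.mk (((s.toList.reverse).dropWhile
    (fun c => ("!\"#$%&'()*+,-./:;<=>?@[\\]^_`{|}~".toList).contains c)).reverse)

-- ===== PORT A =====
-- the for-loop, state = (action_relations, action, action_used); final flush included
def earLoopA : List (String × String) → List (String × Option String) →
    Option String → Bool → List (String × Option String)
  | [], acc, action, used =>
      if !used then
        match action with
        | some a => acc ++ [(a, none)]
        | none => acc
      else acc
  | (token, tag) :: rest, acc, action, used =>
      if tag = "ACTION" then
        let acc' :=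
          if !used then
            match action with
            | some a => acc ++ [(a, none)]
            | none => acc
          else acc
        earLoopA rest acc' (some token) false
      else if tag = "INGREDIENT" ∨ tag = "UTENSIL" then
        let object := pyRstripPunct token
        match action with
        | some a => earLoopA rest (acc ++ [(a, some object)]) action true
        | none => earLoopA rest acc action used
      else earLoopA rest acc action used

def extract_action_relations (tokens : List String) (tags : List String) :
    List (String × Option String) :=
  earLoopA (tokens.zip tags) [] none false

-- ===== PORT B =====
-- pass 1: recursion over the token/tag pairs carrying the open group `current`
def earGroups : List (String × String) → Option (String × List String) →
    List (String × List String)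
  | [], none => []
  | [], some g => [g]
  | (token, tag) :: rest, current =>
      if tag = "ACTION" then
        (match current with | some g => [g] | none => []) ++
          earGroups rest (some (token, []))
      else if tag = "INGREDIENT" ∨ tag = "UTENSIL" then
        match current with
        | some (a, objs) => earGroups rest (some (a, objs ++ [pyRstripPunct token]))
        | none => earGroups rest none
      else earGroups rest current

-- pass 2: flatten the groups
def earFlatten : List (String × List String) → List (String × Option String)
  | [] => []
  | (action, objs) :: rest =>
      (if objs.isEmpty then [(action, none)]
       else objs.map (fun o => (action, some o))) ++ earFlatten rest

def extract_action_relations_alt (tokens : List String) (tags : List String) :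
    List (String × Option String) :=
  earFlatten (earGroups (tokens.zip tags) none)

-- ===== PRECONDITION & SPEC =====
def Spec_extract_action_relations (tokens : List String) (tags : List String) (out : List (String × Option String)) : Prop := out = extract_action_relations_alt tokens tags
instance (tokens : List String) (tags : List String) (out : List (String × Option String)) : Decidable (Spec_extract_action_relations tokens tags out) := by unfold Spec_extract_action_relations; infer_instance

-- ===== CLAIM (what is proved, stated in full; the proofs are below) =====
def Claim_equal_extract_action_relations : Prop := ∀ (tokens : List String) (tags : List String), Dom_extract_action_relations tokens tags → Spec_extract_action_relations tokens tags (extract_action_relations tokens tags)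

-- ===== LEMMAS AND PROOFS =====

-- objects collected before the next ACTION (or the end)
def earFo : List (String × String) → List String
  | [] => []
  | (token, tag) :: rest =>
      if tag = "ACTION" then []
      else if tag = "INGREDIENT" ∨ tag = "UTENSIL" then pyRstripPunct token :: earFo rest
      else earFo rest

-- groups produced from the next ACTION onward
def earFg : List (String × String) → List (String × List String)
  | [] => []
  | (token, tag) :: rest =>
      if tag = "ACTION" then earGroups rest (some (token, []))
      else earFg rest

theorem earGroups_shape (ps : List (String × String)) (a : String) (objs : List String) :
    earGroups ps (some (a, objs)) = (a, objs ++ earFo ps) :: earFg ps := by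
  induction ps generalizing objs with
  | nil => simp [earGroups, earFo, earFg]
  | cons p rest ih =>
      obtain ⟨token, tag⟩ := p
      by_cases h1 : tag = "ACTION"
      · simp [earGroups, earFo, earFg, h1]
      · by_cases h2 : tag = "INGREDIENT" ∨ tag = "UTENSIL"
        · simp [earGroups, earFo, earFg, h1, h2, ih]
        · simp [earGroups, earFo, earFg, h1, h2, ih]

theorem earLoopA_inv (ps : List (String × String)) :
    ∀ acc : List (String × Option String),
      (earLoopA ps acc none false = acc ++ earFlatten (earGroups ps none)) ∧
      (∀ a, earLoopA ps acc (some a) false =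
        acc ++ earFlatten ((a, earFo ps) :: earFg ps)) ∧
      (∀ a, earLoopA ps acc (some a) true =
        acc ++ (earFo ps).map (fun o => (a, some o)) ++ earFlatten (earFg ps)) := by
  induction ps with
  | nil =>
      intro acc
      refine ⟨by simp [earLoopA, earGroups, earFlatten], ?_, ?_⟩
      · intro a; simp [earLoopA, earFo, earFg, earFlatten]
      · intro a; simp [earLoopA, earFo, earFg, earFlatten]
  | cons p rest ih =>
      intro acc
      obtain ⟨token, tag⟩ := p
      by_cases h1 : tag = "ACTION"
      · refine ⟨?_, ?_, ?_⟩
        · simp [earLoopA, earGroups, h1, (ih acc).2.1, earGroups_shape]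
        · intro a
          simp [earLoopA, h1, (ih (acc ++ [(a, none)])).2.1, earFo, earFg,
            earGroups_shape, earFlatten]
        · intro a
          simp [earLoopA, h1, (ih acc).2.1, earFo, earFg, earGroups_shape]
      · by_cases h2 : tag = "INGREDIENT" ∨ tag = "UTENSIL"
        · refine ⟨?_, ?_, ?_⟩
          · simp [earLoopA, earGroups, h1, h2, (ih acc).1]
          · intro a
            simp [earLoopA, h1, h2, (ih (acc ++ [(a, some (pyRstripPunct token))])).2.2,
              earFo, earFg, earFlatten]
          · intro a
            simp [earLoopA, h1, h2, (ih (acc ++ [(a, some (pyRstripPunct token))])).2.2,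
              earFo, earFg]
        · refine ⟨?_, ?_, ?_⟩
          · simp [earLoopA, earGroups, h1, h2, (ih acc).1]
          · intro a; simp [earLoopA, h1, h2, (ih acc).2.1, earFo, earFg]
          · intro a; simp [earLoopA, h1, h2, (ih acc).2.2, earFo, earFg]

-- ===== VERDICT (by name: the statement is the Claim_ definition above) =====
theorem extract_action_relations_spec : Claim_equal_extract_action_relations := by
  intro tokens tags _
  unfold Spec_extract_action_relations extract_action_relations extract_action_relations_alt
  simpa using (earLoopA_inv (tokens.zip tags) []).1
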